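-- pv_equiv track=rewrite | github.com/jwoody02/jwood-leetcode-progress | minimum-moves-to-convert-string/minimum-moves-to-convert-string.py | minimumMoves
-- ===== SOURCE A (Python) =====
-- def minimumMoves(s: str) -> int:
--
--     # return answer and index
--     ans = i = 0
--
--     while i < len(s):
--         # if "X" then move forward 3 and add to ans
--         if s[i] == "X":
--             i += 2
--             ans += 1
--
--         # add to i either way
--         i += 1
--     return ans
-- ===== SOURCE B (Python) =====
-- def minimumMoves(s: str) -> int:
--     # Stage 1: extract the list of X positions once.
--     ps = [i for i, ch in enumerate(s) if ch == "X"]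
--     # Stage 2: repeatedly pick the leftmost remaining X and discard every
--     # position its move covers (anything <= first + 2).
--     ans = 0
--     while ps:
--         ans += 1
--         ps = [p for p in ps if p > ps[0] + 2]
--     return ans
-- ===== Notes on version B (the rewrite author's own statement) =====
-- stated objective: alternative
-- what changed: B works on a different representation: one comprehension extracts the list of X positions, then a second loop repeatedly takes the leftmost remaining position and filters out every position its move covers, instead of A's single character scan with a jumping cursor.
import Mathlib
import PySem

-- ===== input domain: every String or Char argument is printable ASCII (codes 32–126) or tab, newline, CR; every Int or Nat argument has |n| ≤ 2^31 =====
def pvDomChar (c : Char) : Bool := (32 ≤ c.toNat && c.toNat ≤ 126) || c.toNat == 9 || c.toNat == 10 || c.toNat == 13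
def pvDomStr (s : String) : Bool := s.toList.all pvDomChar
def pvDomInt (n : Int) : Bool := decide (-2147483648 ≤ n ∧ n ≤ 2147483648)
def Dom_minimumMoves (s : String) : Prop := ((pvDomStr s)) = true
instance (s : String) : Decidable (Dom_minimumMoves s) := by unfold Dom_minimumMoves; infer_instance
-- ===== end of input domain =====

-- B changes the representation: it extracts the list of X positions first, then
-- repeatedly filters away the positions covered by the leftmost one; same result.

-- ===== PORT A =====
-- A's while loop advances an index i, skipping 2 extra positions after an 'X';
-- ported as recursion on the remaining characters, where the index jump is 'drop 2'.
def minimumMovesLoopA : List Char → Int → Int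
  | [], ans => ans
  | c :: rest, ans =>
    if c == 'X' then minimumMovesLoopA (rest.drop 2) (ans + 1)
    else minimumMovesLoopA rest ans
termination_by cs _ => cs.length
decreasing_by all_goals (simp; try omega)

def minimumMoves (s : String) : Int := minimumMovesLoopA s.toList 0

-- ===== PORT B =====
-- Source B's 'while ps:' loop: take ps[0], keep only positions beyond ps[0]+2.
def minimumMovesLoopB : List Int → Int → Int
  | [], ans => ans
  | h :: t, ans =>
    minimumMovesLoopB ((h :: t).filter (fun p => decide (h + 2 < p))) (ans + 1)
termination_by ps _ => ps.length
decreasing_by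
  simp only [List.filter_cons]
  have : ¬ (h + 2 < h) := by omega
  simp [this]
  exact List.length_filter_le _ _

def minimumMoves_alt (s : String) : Int :=
  minimumMovesLoopB
    (((PySem.List.enumerate s.toList 0).filter (fun p => p.2 == 'X')).map Prod.fst) 0

-- ===== PRECONDITION & SPEC =====
def Spec_minimumMoves (s : String) (out : Int) : Prop := out = minimumMoves_alt s
instance (s : String) (out : Int) : Decidable (Spec_minimumMoves s out) := by unfold Spec_minimumMoves; infer_instance

-- ===== CLAIM (what is proved, stated in full; the proofs are below) =====
def Claim_equal_minimumMoves : Prop := ∀ (s : String), Dom_minimumMoves s → Spec_minimumMoves s (minimumMoves s)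

-- ===== LEMMAS AND PROOFS =====

-- proof-side view of Source B's stage-1 comprehension
def positionsX : List Char → Int → List Int
  | [], _ => []
  | c :: t, n => if c == 'X' then n :: positionsX t (n + 1) else positionsX t (n + 1)

theorem positionsX_eq (cs : List Char) (n : Int) :
    ((PySem.List.enumerate cs n).filter (fun p => p.2 == 'X')).map Prod.fst
      = positionsX cs n := by
  induction cs generalizing n with
  | nil => simp [PySem.List.enumerate_nil, positionsX]
  | cons c t ih =>
    rw [PySem.List.enumerate_cons, List.filter_cons]
    by_cases hc : c = 'X' <;> simp [hc, positionsX, ih]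

theorem positionsX_ge (cs : List Char) (n : Int) :
    ∀ p ∈ positionsX cs n, n ≤ p := by
  induction cs generalizing n with
  | nil => simp [positionsX]
  | cons c t ih =>
    intro p hp
    by_cases hc : c = 'X' <;> simp [positionsX, hc] at hp
    · rcases hp with rfl | hp
      · omega
      · have := ih (n + 1) p hp; omega
    · have := ih (n + 1) p hp; omega

theorem positionsX_filter (rest : List Char) (n : Int) :
    (positionsX rest (n + 1)).filter (fun p => decide (n + 2 < p))
      = positionsX (rest.drop 2) (n + 3) := by
  match rest with
  | [] => simp [positionsX]
  | [a] =>
    by_cases ha : a = 'X' <;>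
      simp [positionsX, ha, show ¬ (n + 2 < n + 1) by omega]
  | a :: b :: r =>
    have hall : (positionsX r (n + 1 + 1 + 1)).filter (fun p => decide (n + 2 < p))
        = positionsX r (n + 1 + 1 + 1) := by
      apply List.filter_eq_self.mpr
      intro p hp
      have := positionsX_ge r (n + 1 + 1 + 1) p hp
      simpa using by omega
    by_cases ha : a = 'X' <;> by_cases hb : b = 'X' <;>
      simp [positionsX, ha, hb,
        show ¬ (n + 2 < n + 1) by omega, show ¬ (n + 2 < n + 1 + 1) by omega] <;>
      · have h3 : n + 1 + 1 + 1 = n + 3 := by omega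
        rw [← h3]; exact hall

-- main invariant: B's filter loop over the X positions computes A's jumping loop
theorem loops_eq (cs : List Char) (n ans : Int) :
    minimumMovesLoopB (positionsX cs n) ans = minimumMovesLoopA cs ans := by
  match cs with
  | [] => simp [positionsX, minimumMovesLoopA, minimumMovesLoopB]
  | c :: rest =>
    by_cases hc : c = 'X'
    · subst hc
      rw [show positionsX ('X' :: rest) n = n :: positionsX rest (n + 1) by
            simp [positionsX]]
      rw [minimumMovesLoopB]
      rw [List.filter_cons]
      rw [show (decide (n + 2 < n)) = false by simp]
      simp only [Bool.false_eq_true, if_false]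
      rw [positionsX_filter rest n,
          loops_eq (rest.drop 2) (n + 3) (ans + 1)]
      simp [minimumMovesLoopA]
    · rw [show positionsX (c :: rest) n = positionsX rest (n + 1) by
            simp [positionsX, hc]]
      rw [loops_eq rest (n + 1) ans]
      simp [minimumMovesLoopA, hc]
termination_by cs.length
decreasing_by all_goals simp

-- ===== VERDICT (by name: the statement is the Claim_ definition above) =====
theorem minimumMoves_spec : Claim_equal_minimumMoves := by
  intro s _
  unfold Spec_minimumMoves minimumMoves minimumMoves_alt
  rw [positionsX_eq]
  exact (loops_eq s.toList 0 0).symm
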